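-- pv_equiv track=rewrite | github.com/alpersonalwebsite/git_batch_pull | scripts/update_changelog.py | analyze_changes
-- ===== SOURCE A (Python) =====
-- def analyze_changes(files):
--     """Analyze changed files and suggest changelog categories."""
--     suggestions = {
--         "Added": [],
--         "Changed": [],
--         "Fixed": [],
--         "Security": [],
--         "Technical": [],
--         "Documentation": [],
--         "Breaking Changes": [],
--     }
--
--     for file in files:
--         if not file.strip():
--             continue
--
--         # Documentation changes
--         if file.startswith("docs/") or file.endswith(".md"):
--             if "security" in file.lower():
--                 suggestions["Security"].append(f"Updated {file}")
--             else:
--                 suggestions["Documentation"].append(f"Updated {file}")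
--
--         # Source code changes
--         elif file.startswith("src/"):
--             if "security" in file:
--                 suggestions["Security"].append(f"Enhanced {file}")
--             elif "cli" in file:
--                 suggestions["Changed"].append(f"Updated CLI in {file}")
--             elif "test" in file:
--                 suggestions["Technical"].append(f"Updated tests in {file}")
--             else:
--                 suggestions["Changed"].append(f"Modified {file}")
--
--         # Test changes
--         elif file.startswith("tests/"):
--             suggestions["Technical"].append(f"Updated tests in {file}")
--
--         # Configuration changes
--         elif file.endswith((".yml", ".yaml", ".toml", ".cfg", ".ini")):
--             suggestions["Technical"].append(f"Updated configuration in {file}")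
--
--         # CI/CD changes
--         elif ".github" in file:
--             suggestions["Technical"].append(f"Updated CI/CD in {file}")
--
--         # Docker changes
--         elif "docker" in file.lower() or file == "Dockerfile":
--             suggestions["Technical"].append("Updated Docker configuration")
--
--         # Dependencies
--         elif "requirements" in file or file == "pyproject.toml":
--             suggestions["Technical"].append(f"Updated dependencies in {file}")
--
--     return suggestions
-- ===== SOURCE B (Python) =====
-- def _classify(file):
--     """Return (section, message) for one non-blank file, or None if uncategorized."""
--     if file.startswith("docs/") or file.endswith(".md"):
--         if "security" in file.lower():
--             return ("Security", f"Updated {file}")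
--         return ("Documentation", f"Updated {file}")
--     if file.startswith("src/"):
--         if "security" in file:
--             return ("Security", f"Enhanced {file}")
--         if "cli" in file:
--             return ("Changed", f"Updated CLI in {file}")
--         if "test" in file:
--             return ("Technical", f"Updated tests in {file}")
--         return ("Changed", f"Modified {file}")
--     if file.startswith("tests/"):
--         return ("Technical", f"Updated tests in {file}")
--     if file.endswith((".yml", ".yaml", ".toml", ".cfg", ".ini")):
--         return ("Technical", f"Updated configuration in {file}")
--     if ".github" in file:
--         return ("Technical", f"Updated CI/CD in {file}")
--     if "docker" in file.lower() or file == "Dockerfile":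
--         return ("Technical", "Updated Docker configuration")
--     if "requirements" in file or file == "pyproject.toml":
--         return ("Technical", f"Updated dependencies in {file}")
--     return None
--
--
-- def analyze_changes(files):
--     """Analyze changed files and suggest changelog categories."""
--     # Stage 1: tag every non-blank file with its (section, message) pair.
--     tagged = [t for t in (_classify(f) for f in files if f.strip()) if t is not None]
--     # Stage 2: group the tagged messages by section, in fixed section order.
--     return {
--         section: [msg for sec, msg in tagged if sec == section]
--         for section in ("Added", "Changed", "Fixed", "Security",
--                         "Technical", "Documentation", "Breaking Changes")
--     }
-- ===== Notes on version B (the rewrite author's own statement) =====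
-- stated objective: alternative
-- what changed: Replaced A's single pass that mutates seven section lists in a dict with a two-stage pipeline: first map each non-blank file to a (section, message) tag via a pure classifier, then build the result dict by grouping the tag stream per section with one comprehension per key.
import Mathlib
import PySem

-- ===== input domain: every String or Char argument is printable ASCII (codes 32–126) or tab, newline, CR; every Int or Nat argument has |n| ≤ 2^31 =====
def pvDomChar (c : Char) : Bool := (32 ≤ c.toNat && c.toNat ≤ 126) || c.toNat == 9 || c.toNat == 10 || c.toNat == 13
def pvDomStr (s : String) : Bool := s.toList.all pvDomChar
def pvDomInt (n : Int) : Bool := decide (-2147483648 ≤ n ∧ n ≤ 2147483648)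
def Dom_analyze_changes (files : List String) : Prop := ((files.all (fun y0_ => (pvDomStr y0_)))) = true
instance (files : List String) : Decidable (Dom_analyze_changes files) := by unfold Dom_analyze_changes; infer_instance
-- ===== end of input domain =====

-- B replaces A's single mutate-the-dict pass by a two-stage pipeline (tag each file, then group tags per sct); same cost, different decomposition.


-- ===== PORT A =====
def analyze_changes_init : PySem.Dict String (List String) :=
  PySem.Dict.ofList [("Added", []), ("Changed", []), ("Fixed", []), ("Security", []),
    ("Technical", []), ("Documentation", []), ("Breaking Changes", [])]

-- the body of A's for-loop, one file at a time (appends via Dict.modify = suggestions[k].append)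
def analyze_changes_step (d : PySem.Dict String (List String)) (file : String) :
    PySem.Dict String (List String) :=
  if (PySem.Str.strip file) == "" then d
  else if PySem.Str.startswith file "docs/" || PySem.Str.endswith file ".md" then
    if PySem.Str.isIn "security" (PySem.Str.lower file) then
      d.modify "Security" [] (· ++ ["Updated " ++ file])
    else
      d.modify "Documentation" [] (· ++ ["Updated " ++ file])
  else if PySem.Str.startswith file "src/" then
    if PySem.Str.isIn "security" file then
      d.modify "Security" [] (· ++ ["Enhanced " ++ file])
    else if PySem.Str.isIn "cli" file then
      d.modify "Changed" [] (· ++ ["Updated CLI in " ++ file])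
    else if PySem.Str.isIn "test" file then
      d.modify "Technical" [] (· ++ ["Updated tests in " ++ file])
    else
      d.modify "Changed" [] (· ++ ["Modified " ++ file])
  else if PySem.Str.startswith file "tests/" then
    d.modify "Technical" [] (· ++ ["Updated tests in " ++ file])
  else if PySem.Str.endswith file ".yml" || PySem.Str.endswith file ".yaml" ||
          PySem.Str.endswith file ".toml" || PySem.Str.endswith file ".cfg" ||
          PySem.Str.endswith file ".ini" then
    d.modify "Technical" [] (· ++ ["Updated configuration in " ++ file])
  else if PySem.Str.isIn ".github" file then
    d.modify "Technical" [] (· ++ ["Updated CI/CD in " ++ file])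
  else if PySem.Str.isIn "docker" (PySem.Str.lower file) || file == "Dockerfile" then
    d.modify "Technical" [] (· ++ ["Updated Docker configuration"])
  else if PySem.Str.isIn "requirements" file || file == "pyproject.toml" then
    d.modify "Technical" [] (· ++ ["Updated dependencies in " ++ file])
  else d

def analyze_changes (files : List String) : List (String × List String) :=
  (files.foldl analyze_changes_step analyze_changes_init).items

-- ===== PORT B =====
-- Source B's _classify: the (sct, message) tag of one non-blank file, or none if uncategorized
def pvClassify (file : String) : Option (String × String) :=
  if PySem.Str.startswith file "docs/" || PySem.Str.endswith file ".md" then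
    if PySem.Str.isIn "security" (PySem.Str.lower file) then
      some ("Security", "Updated " ++ file)
    else some ("Documentation", "Updated " ++ file)
  else if PySem.Str.startswith file "src/" then
    if PySem.Str.isIn "security" file then some ("Security", "Enhanced " ++ file)
    else if PySem.Str.isIn "cli" file then some ("Changed", "Updated CLI in " ++ file)
    else if PySem.Str.isIn "test" file then some ("Technical", "Updated tests in " ++ file)
    else some ("Changed", "Modified " ++ file)
  else if PySem.Str.startswith file "tests/" then
    some ("Technical", "Updated tests in " ++ file)
  else if PySem.Str.endswith file ".yml" || PySem.Str.endswith file ".yaml" ||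
          PySem.Str.endswith file ".toml" || PySem.Str.endswith file ".cfg" ||
          PySem.Str.endswith file ".ini" then
    some ("Technical", "Updated configuration in " ++ file)
  else if PySem.Str.isIn ".github" file then
    some ("Technical", "Updated CI/CD in " ++ file)
  else if PySem.Str.isIn "docker" (PySem.Str.lower file) || file == "Dockerfile" then
    some ("Technical", "Updated Docker configuration")
  else if PySem.Str.isIn "requirements" file || file == "pyproject.toml" then
    some ("Technical", "Updated dependencies in " ++ file)
  else none

-- Source B's stage-2 comprehension: the messages of one sct, drawn from the tag stream
def pvGroup (sct : String) (tagged : List (String × String)) : List String :=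
  tagged.filterMap (fun p => if p.1 == sct then some p.2 else none)

def analyze_changes_alt (files : List String) : List (String × List String) :=
  let tagged := (files.filter (fun f => !((PySem.Str.strip f) == ""))).filterMap pvClassify
  ["Added", "Changed", "Fixed", "Security", "Technical", "Documentation",
   "Breaking Changes"].map (fun sct => (sct, pvGroup sct tagged))

-- ===== PRECONDITION & SPEC =====
def Spec_analyze_changes (files : List String) (out : List (String × List String)) : Prop := out = analyze_changes_alt files
instance (files : List String) (out : List (String × List String)) : Decidable (Spec_analyze_changes files out) := by unfold Spec_analyze_changes; infer_instance

-- ===== CLAIM =====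
def Claim_equal_analyze_changes : Prop := ∀ (files : List String), Dom_analyze_changes files → Spec_analyze_changes files (analyze_changes files)

-- ===== LEMMAS AND PROOFS =====
-- the dict A's loop has built after consuming tags `m`: each sct holds its group of m
def pvDictOf (m : List (String × String)) : PySem.Dict String (List String) :=
  PySem.Dict.mk (["Added", "Changed", "Fixed", "Security", "Technical", "Documentation",
    "Breaking Changes"].map (fun s => (s, pvGroup s m)))

-- one iteration of A's loop = appending the file's tag (if any) to the tag stream
theorem pv_step_dictOf (m : List (String × String)) (f : String) :
    analyze_changes_step (pvDictOf m) f =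
      pvDictOf (m ++ (if (PySem.Str.strip f) == "" then [] else (pvClassify f).toList)) := by
  unfold analyze_changes_step pvClassify
  by_cases h0 : ((PySem.Str.strip f) == "") = true
  · simp [h0]
  simp only [if_neg h0]
  by_cases h1 : (PySem.Str.startswith f "docs/" || PySem.Str.endswith f ".md") = true
  · by_cases h1s : (PySem.Str.isIn "security" (PySem.Str.lower f)) = true <;>
      simp_all [PySem.Dict.modify, PySem.Dict.insert, PySem.Dict.getD, PySem.Dict.get?, PySem.Dict.contains, pvDictOf, pvGroup]
  · by_cases h2 : (PySem.Str.startswith f "src/") = true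
    · by_cases h2a : (PySem.Str.isIn "security" f) = true
      · simp_all [PySem.Dict.modify, PySem.Dict.insert, PySem.Dict.getD, PySem.Dict.get?, PySem.Dict.contains, pvDictOf, pvGroup]
      · by_cases h2b : (PySem.Str.isIn "cli" f) = true
        · simp_all [PySem.Dict.modify, PySem.Dict.insert, PySem.Dict.getD, PySem.Dict.get?, PySem.Dict.contains, pvDictOf, pvGroup]
        · by_cases h2c : (PySem.Str.isIn "test" f) = true <;>
            simp_all [PySem.Dict.modify, PySem.Dict.insert, PySem.Dict.getD, PySem.Dict.get?, PySem.Dict.contains, pvDictOf, pvGroup]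
    · by_cases h3 : (PySem.Str.startswith f "tests/") = true
      · simp_all [PySem.Dict.modify, PySem.Dict.insert, PySem.Dict.getD, PySem.Dict.get?, PySem.Dict.contains, pvDictOf, pvGroup]
      · by_cases h4 : (PySem.Str.endswith f ".yml" || PySem.Str.endswith f ".yaml" ||
            PySem.Str.endswith f ".toml" || PySem.Str.endswith f ".cfg" ||
            PySem.Str.endswith f ".ini") = true
        · simp_all [PySem.Dict.modify, PySem.Dict.insert, PySem.Dict.getD, PySem.Dict.get?, PySem.Dict.contains, pvDictOf, pvGroup]
        · by_cases h5 : (PySem.Str.isIn ".github" f) = true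
          · simp_all [PySem.Dict.modify, PySem.Dict.insert, PySem.Dict.getD, PySem.Dict.get?, PySem.Dict.contains, pvDictOf, pvGroup]
          · by_cases h6 : (PySem.Str.isIn "docker" (PySem.Str.lower f) || f == "Dockerfile") = true
            · simp_all [PySem.Dict.modify, PySem.Dict.insert, PySem.Dict.getD, PySem.Dict.get?, PySem.Dict.contains, pvDictOf, pvGroup]
            · by_cases h7 : (PySem.Str.isIn "requirements" f || f == "pyproject.toml") = true <;>
                simp_all [PySem.Dict.modify, PySem.Dict.insert, PySem.Dict.getD, PySem.Dict.get?, PySem.Dict.contains, pvDictOf, pvGroup]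

-- A's whole loop = B's stage-1 tag stream, accumulated
theorem pv_foldl_dictOf (files : List String) (m : List (String × String)) :
    files.foldl analyze_changes_step (pvDictOf m) =
      pvDictOf (m ++ (files.filter (fun f => !((PySem.Str.strip f) == ""))).filterMap pvClassify) := by
  induction files generalizing m with
  | nil => simp
  | cons f rest ih =>
    simp only [List.foldl_cons, pv_step_dictOf, ih, List.filter_cons]
    by_cases h : ((PySem.Str.strip f) == "") = true
    · simp [h]
    · cases hc : pvClassify f <;> simp [h, hc]

theorem pv_init_eq : analyze_changes_init = pvDictOf [] := by decide

-- ===== VERDICT (by name: the statement is the Claim_ definition above) =====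
theorem analyze_changes_spec : Claim_equal_analyze_changes := by
  intro files _
  unfold Spec_analyze_changes analyze_changes analyze_changes_alt
  rw [pv_init_eq, pv_foldl_dictOf]
  simp [pvDictOf]
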